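-- pv_equiv track=rewrite | github.com/pushpa-info-14/python-programming | LeetCode/3500-3750/Q3583 Count Special Triplets.py | specialTriplets2
-- ===== SOURCE A (Python) =====
-- from collections import defaultdict, Counter
-- from typing import List
--
-- def specialTriplets2(nums: List[int]) -> int:
--     mod = 10 ** 9 + 7
--     n = len(nums)
--     left = Counter()
--     right = Counter(nums)
--     res = 0
--     for i in range(n):
--         num = nums[i]
--         target = num * 2
--         right[num] -= 1
--         res += left[target] * right[target]
--         res %= mod
--         left[num] += 1
--     return res % mod
-- ===== SOURCE B (Python) =====
-- def specialTriplets2(nums):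
--     mod = 10 ** 9 + 7
--     pos = {}
--     for i, v in enumerate(nums):
--         if v in pos:
--             pos[v].append(i)
--         else:
--             pos[v] = [i]
--     res = 0
--     for m, P in pos.items():
--         T = pos.get(2 * m, [])
--         lenT = len(T)
--         k = 0
--         for p in P:
--             while k < lenT and T[k] < p:
--                 k += 1
--             eq = 1 if k < lenT and T[k] == p else 0
--             res += k * (lenT - k - eq)
--     return res % mod
-- ===== Notes on version B (the rewrite author's own statement) =====
-- stated objective: alternative
-- what changed: Replaces the single left/right Counter sweep with a value-to-sorted-index-list table built once, then per distinct value a two-pointer merge over the index lists of m and 2*m counts earlier/later occurrences of the doubled value.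
import Mathlib
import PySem

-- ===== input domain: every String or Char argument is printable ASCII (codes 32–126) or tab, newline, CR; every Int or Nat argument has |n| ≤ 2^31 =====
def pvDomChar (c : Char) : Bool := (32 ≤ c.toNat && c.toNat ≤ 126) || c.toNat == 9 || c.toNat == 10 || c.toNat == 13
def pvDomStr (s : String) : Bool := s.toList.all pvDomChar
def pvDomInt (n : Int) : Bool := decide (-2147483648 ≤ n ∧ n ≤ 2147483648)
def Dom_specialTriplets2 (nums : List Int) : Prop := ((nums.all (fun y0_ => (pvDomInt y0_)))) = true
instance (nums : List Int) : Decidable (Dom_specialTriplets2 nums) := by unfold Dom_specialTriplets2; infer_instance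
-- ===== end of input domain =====

-- B replaces A's single sweep with two live Counters by a value → index-list table plus a
-- per-value two-pointer merge; same return value, similar cost (objective: alternative).

-- ===== PORT A =====
-- for i in range(n): num = nums[i]; right[num] -= 1; res = (res + left[2num]*right[2num]) % mod; left[num] += 1
def specialTriplets2 (nums : List Int) : Int :=
  let mod : Int := 10 ^ 9 + 7
  let n : Int := (nums.length : Int)
  let st := (PySem.List.pyRange 0 n 1).foldl (fun st i =>
      let num := PySem.List.pyGetD nums i 0
      let target := num * 2
      let right := st.2.1.insert num (st.2.1.getD num 0 - 1)
      let res := PySem.Int.mod (st.2.2 + st.1.getD target 0 * right.getD target 0) mod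
      let left := st.1.modify num 0 (· + 1)
      (left, right, res))
    ((PySem.Dict.empty, PySem.Dict.counter nums, 0) :
      PySem.Dict Int Int × PySem.Dict Int Int × Int)
  PySem.Int.mod st.2.2 mod

-- ===== PORT B =====
-- the 'while k < lenT and T[k] < p: k += 1' loop of Source B
def bAdvance (T : List Int) (p : Int) (k : Nat) : Nat :=
  if h : k < T.length then
    (if T.getD k 0 < p then bAdvance T p (k + 1) else k)
  else k
termination_by T.length - k

-- body of Source B's 'for p in P' loop: state = (k, res)
def bGroup (T : List Int) (st : Nat × Int) (p : Int) : Nat × Int :=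
  let k := bAdvance T p st.1
  let eq : Int := if k < T.length ∧ T.getD k 0 = p then 1 else 0
  (k, st.2 + (k : Int) * ((T.length : Int) - (k : Int) - eq))

def specialTriplets2_alt (nums : List Int) : Int :=
  let mod : Int := 10 ^ 9 + 7
  let pos := (PySem.List.enumerate nums 0).foldl
    (fun pos iv =>
      if pos.contains iv.2 then pos.insert iv.2 (pos.getD iv.2 [] ++ [iv.1])
      else pos.insert iv.2 [iv.1])
    (PySem.Dict.empty : PySem.Dict Int (List Int))
  let res := pos.items.foldl (fun res mP =>
      let T := pos.getD (2 * mP.1) []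
      (mP.2.foldl (bGroup T) (0, res)).2) 0
  PySem.Int.mod res mod

-- ===== PRECONDITION & SPEC =====
def Spec_specialTriplets2 (nums : List Int) (out : Int) : Prop := out = specialTriplets2_alt nums
instance (nums : List Int) (out : Int) : Decidable (Spec_specialTriplets2 nums out) := by unfold Spec_specialTriplets2; infer_instance

-- ===== CLAIM (what is proved, stated in full; the proofs are below) =====
def Claim_equal_specialTriplets2 : Prop := ∀ (nums : List Int), Dom_specialTriplets2 nums → Spec_specialTriplets2 nums (specialTriplets2 nums)

-- ===== LEMMAS AND PROOFS =====\n
-- A's loop body, named for the proofs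
def aStep (nums : List Int) (st : PySem.Dict Int Int × PySem.Dict Int Int × Int) (i : Int) :
    PySem.Dict Int Int × PySem.Dict Int Int × Int :=
  let num := PySem.List.pyGetD nums i 0
  let target := num * 2
  let right := st.2.1.insert num (st.2.1.getD num 0 - 1)
  let res := PySem.Int.mod (st.2.2 + st.1.getD target 0 * right.getD target 0) (10 ^ 9 + 7)
  let left := st.1.modify num 0 (· + 1)
  (left, right, res)

-- per-index triplet contribution: (#(2*nums[i]) before i) * (#(2*nums[i]) after i)
def pvF (nums : List Int) (i : Nat) : Int :=
  ((nums.take i).count (nums.getD i 0 * 2) : Int) * ((nums.drop (i+1)).count (nums.getD i 0 * 2) : Int)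

def pvS (nums : List Int) : Int := ((List.range nums.length).map (pvF nums)).sum

lemma aLoop (nums : List Int) (m : Nat) (hm : m ≤ nums.length) :
    (∀ t, ((PySem.List.pyRange 0 (m : Int) 1).foldl (aStep nums)
        (PySem.Dict.empty, PySem.Dict.counter nums, 0)).1.getD t 0 = ((nums.take m).count t : Int)) ∧
    (∀ t, ((PySem.List.pyRange 0 (m : Int) 1).foldl (aStep nums)
        (PySem.Dict.empty, PySem.Dict.counter nums, 0)).2.1.getD t 0 = ((nums.drop m).count t : Int)) ∧
    ((PySem.List.pyRange 0 (m : Int) 1).foldl (aStep nums)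
        (PySem.Dict.empty, PySem.Dict.counter nums, 0)).2.2
      = (((List.range m).map (pvF nums)).sum) % (10 ^ 9 + 7) := by
  induction m with
  | zero =>
    simp [PySem.List.pyRange_one_eq_nil (by omega : (0:Int) ≤ 0), PySem.Dict.getD_empty,
      PySem.Dict.getD_counter]
  | succ m ih =>
    have hm' : m ≤ nums.length := by omega
    have hlt : m < nums.length := by omega
    obtain ⟨ihl, ihr, ihres⟩ := ih hm'
    have hrange : PySem.List.pyRange 0 ((m+1 : Nat) : Int) 1
        = PySem.List.pyRange 0 (m : Int) 1 ++ [(m : Int)] := by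
      push_cast
      exact PySem.List.pyRange_one_succ_right (by positivity)
    rw [hrange, List.foldl_append]
    set st := (PySem.List.pyRange 0 (m : Int) 1).foldl (aStep nums)
        (PySem.Dict.empty, PySem.Dict.counter nums, 0) with hst
    have hnum : PySem.List.pyGetD nums (m : Int) 0 = nums[m] := by
      rw [PySem.List.pyGetD_natCast, List.getD_eq_getElem _ _ hlt]
    have hdrop : nums.drop m = nums[m] :: nums.drop (m+1) := List.drop_eq_getElem_cons hlt
    have htake : nums.take (m+1) = nums.take m ++ [nums[m]] := by
      rw [List.take_succ]
      simp [List.getElem?_eq_getElem hlt]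
    -- the right counter after the decrement
    have hright : ∀ t, ((st.2.1.insert nums[m] (st.2.1.getD nums[m] 0 - 1)).getD t 0)
        = ((nums.drop (m+1)).count t : Int) := by
      intro t
      by_cases h : t = nums[m]
      · subst h
        rw [PySem.Dict.getD_insert, if_pos rfl, ihr, hdrop, List.count_cons_self]
        push_cast; ring
      · rw [PySem.Dict.getD_insert, if_neg h, ihr t, hdrop, List.count_cons_of_ne (fun e => h e.symm)]
    have hG : nums[m]?.getD 0 = nums[m] := by simp [List.getElem?_eq_getElem hlt]
    refine ⟨?_, ?_, ?_⟩
    · intro t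
      simp only [List.foldl_cons, List.foldl_nil, aStep, hnum]
      by_cases h : t = nums[m]
      · subst h
        have hc : (nums.take (m+1)).count nums[m] = (nums.take m).count nums[m] + 1 := by
          rw [htake, List.count_append, List.count_singleton, if_pos (by simp)]
        rw [PySem.Dict.getD_modify_self, ihl, hc]
        push_cast; ring
      · have hne : nums[m] ≠ t := fun e => h e.symm
        have hc : (nums.take (m+1)).count t = (nums.take m).count t := by
          rw [htake, List.count_append, List.count_singleton,
            if_neg (by simpa using hne), Nat.add_zero]
        rw [PySem.Dict.getD_modify_of_ne _ _ _ h, ihl, hc]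
    · intro t
      simp only [List.foldl_cons, List.foldl_nil, aStep, hnum]
      exact hright t
    · simp only [List.foldl_cons, List.foldl_nil, aStep, hnum]
      rw [hright, ihl, ihres, PySem.Int.mod_eq_emod_of_pos (by norm_num),
        Int.emod_add_emod, List.range_succ, List.map_append, List.sum_append]
      simp [pvF, List.getD, hG]

lemma A_eq (nums : List Int) : specialTriplets2 nums = pvS nums % (10 ^ 9 + 7) := by
  have h := (aLoop nums nums.length le_rfl).2.2
  show PySem.Int.mod ((PySem.List.pyRange 0 (nums.length : Int) 1).foldl (aStep nums)
      (PySem.Dict.empty, PySem.Dict.counter nums, 0)).2.2 (10 ^ 9 + 7) = _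
  rw [h, PySem.Int.mod_eq_emod_of_pos (by norm_num), Int.emod_emod_of_dvd _ dvd_rfl, pvS]



-- B's builder loop, named for the proofs
def bBuild (nums : List Int) : PySem.Dict Int (List Int) :=
  (PySem.List.enumerate nums 0).foldl
    (fun pos iv =>
      if pos.contains iv.2 then pos.insert iv.2 (pos.getD iv.2 [] ++ [iv.1])
      else pos.insert iv.2 [iv.1])
    (PySem.Dict.empty : PySem.Dict Int (List Int))

-- indices (as Nat, resp. Int) at which value v occurs
def idxN (nums : List Int) (v : Int) : List Nat :=
  (List.range nums.length).filter (fun i => nums.getD i 0 = v)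

def idxI (nums : List Int) (v : Int) : List Int := List.map (fun i : Nat => (i : Int)) (idxN nums v)

lemma getD_of_contains_false (d : PySem.Dict Int (List Int)) (k : Int)
    (h : d.contains k = false) : d.getD k [] = [] := by
  simp [PySem.Dict.getD, (PySem.Dict.get?_eq_none_iff_contains d k).2 h]

lemma idxN_append (xs : List Int) (x : Int) (v : Int) :
    idxN (xs ++ [x]) v = idxN xs v ++ (if v = x then [xs.length] else []) := by
  unfold idxN
  rw [List.length_append, List.length_singleton, List.range_succ, List.filter_append]
  congr 1
  · apply List.filter_congr
    intro i hi
    rw [List.getD_append _ _ _ _ (List.mem_range.mp hi)]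
  · have hx : (xs ++ [x]).getD xs.length 0 = x := by
      rw [List.getD_append_right _ _ _ _ le_rfl]
      simp
    by_cases h : v = x
    · simp [hx, h]
    · simp [hx, h, Ne.symm h]

lemma bBuild_spec (nums : List Int) :
    (∀ v, (bBuild nums).getD v [] = idxI nums v) ∧ (bBuild nums).keys.Nodup ∧
      (∀ v, v ∈ (bBuild nums).keys ↔ v ∈ nums) := by
  induction nums using List.reverseRecOn with
  | nil =>
    refine ⟨?_, ?_, ?_⟩ <;>
      simp [bBuild, PySem.List.enumerate_nil, PySem.Dict.getD_empty, PySem.Dict.keys_empty,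
        idxI, idxN]
  | append_singleton xs x ih =>
    obtain ⟨ihg, ihnd, ihm⟩ := ih
    have hb : bBuild (xs ++ [x]) =
        (if (bBuild xs).contains x then
          (bBuild xs).insert x ((bBuild xs).getD x [] ++ [(xs.length : Int)])
        else (bBuild xs).insert x [(xs.length : Int)]) := by
      unfold bBuild
      rw [PySem.List.enumerate_append, List.foldl_append, PySem.List.enumerate_cons,
        PySem.List.enumerate_nil]
      simp
    have hins : bBuild (xs ++ [x]) =
        (bBuild xs).insert x ((bBuild xs).getD x [] ++ [(xs.length : Int)]) := by
      rw [hb]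
      by_cases h : (bBuild xs).contains x
      · rw [if_pos h]
      · rw [if_neg h, getD_of_contains_false _ _ (by simpa using h)]
        simp
    refine ⟨?_, ?_, ?_⟩
    · intro v
      by_cases h : v = x <;>
        simp [hins, PySem.Dict.getD_insert, h, idxI, idxN_append, ihg]
    · rw [hins]; exact PySem.Dict.nodup_keys_insert _ _ _ ihnd
    · intro v
      rw [hins]
      rw [PySem.Dict.mem_keys_insert, ihm v, List.mem_append, List.mem_singleton]
      tauto

lemma idxI_sorted (nums : List Int) (v : Int) : (idxI nums v).Pairwise (· < ·) := by
  have h1 : (idxN nums v).Pairwise (· < ·) := List.Pairwise.filter _ List.pairwise_lt_range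
  simp only [idxI, List.pairwise_map]
  refine List.Pairwise.imp ?_ h1
  intro a b h
  exact_mod_cast h


-- number of elements of T strictly below p
def cLT (T : List Int) (p : Int) : Nat := T.countP (fun x => x < p)

lemma countP_cut (p : Int) : ∀ (T : List Int), T.Pairwise (· < ·) → ∀ k, k ≤ T.length →
    (∀ j (hj : j < T.length), j < k → T[j] < p) →
    (∀ (hk : k < T.length), ¬ T[k] < p) → cLT T p = k := by
  intro T
  induction T with
  | nil =>
    intro _ k hk _ _
    simp at hk
    simp [cLT, hk]
  | cons a T' ih =>
    intro hs k hk hlt hge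
    match k with
    | 0 =>
      have ha : ¬ a < p := by simpa using hge (by simp)
      rw [cLT, List.countP_eq_zero.mpr]
      intro y hy
      simp only [decide_eq_true_eq]
      rcases List.mem_cons.mp hy with h | h
      · subst h; exact ha
      · have : a < y := List.rel_of_pairwise_cons hs h
        omega
    | k' + 1 =>
      have ha : a < p := by
        have h0 := hlt 0 (by simp) (by omega)
        simpa using h0
      have h2 : cLT T' p = k' := by
        refine ih hs.of_cons k' (by simpa using hk) ?_ ?_
        · intro j hj hjk
          have h3 := hlt (j+1) (by simp; omega) (by omega)
          simpa using h3
        · intro hk'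
          have h4 := hge (by simp; omega)
          simpa using h4
      have h1 : cLT (a :: T') p = cLT T' p + 1 := by
        rw [cLT, List.countP_cons_of_pos (by simpa using ha)]
        rfl
      rw [h1, h2]

lemma getElem_lt_of_lt_cLT (T : List Int) (p : Int) (hs : T.Pairwise (· < ·)) :
    ∀ j (hj : j < T.length), j < cLT T p → T[j] < p := by
  intro j hj hjc
  by_contra hnot
  have hdropzero : (T.drop j).countP (fun x => x < p) = 0 := by
    rw [List.countP_eq_zero]
    intro y hy
    simp only [decide_eq_true_eq]
    rcases List.mem_iff_getElem.mp hy with ⟨l, hl, rfl⟩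
    have hdl : (List.drop j T).length = T.length - j := by simp
    have hjl : j + l < T.length := by omega
    rw [List.getElem_drop]
    rcases Nat.eq_zero_or_pos l with h0 | h0
    · subst h0; simpa using hnot
    · have hlt2 : T[j] < T[j + l]'hjl :=
        List.pairwise_iff_getElem.mp hs j (j + l) hj hjl (by omega)
      omega
  have hsplit : cLT T p = (T.take j).countP (fun x => x < p) + (T.drop j).countP (fun x => x < p) := by
    rw [cLT, ← List.countP_append, List.take_append_drop]
  have htle : (T.take j).countP (fun x => x < p) ≤ j := by
    calc (T.take j).countP (fun x => x < p) ≤ (T.take j).length := List.countP_le_length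
    _ ≤ j := by simp
  omega

lemma bAdvance_eq (T : List Int) (p : Int) (hs : T.Pairwise (· < ·)) :
    ∀ d k, T.length - k ≤ d → k ≤ T.length →
    (∀ j (hj : j < T.length), j < k → T[j] < p) → bAdvance T p k = cLT T p := by
  intro d
  induction d with
  | zero =>
    intro k hd hk hlt
    have hk' : k = T.length := by omega
    rw [bAdvance, dif_neg (by omega)]
    subst hk'
    exact (List.countP_eq_length.mpr (fun a ha => by
      rcases List.mem_iff_getElem.mp ha with ⟨j, hj, rfl⟩
      simpa using hlt j hj hj)).symm
  | succ d ihd =>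
    intro k hd hk hlt
    rcases Nat.lt_or_ge k T.length with hkl | hkl
    · rw [bAdvance, dif_pos hkl, List.getD_eq_getElem _ _ hkl]
      by_cases hTk : T[k] < p
      · rw [if_pos hTk]
        exact ihd (k+1) (by omega) (by omega)
          (fun j hj hjk => by
            rcases Nat.lt_or_ge j k with h | h
            · exact hlt j hj h
            · have : j = k := by omega
              subst this; exact hTk)
      · rw [if_neg hTk]
        exact (countP_cut p T hs k hk hlt (fun _ => hTk)).symm
    · have hk' : k = T.length := by omega
      rw [bAdvance, dif_neg (by omega)]
      subst hk'
      exact (List.countP_eq_length.mpr (fun a ha => by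
        rcases List.mem_iff_getElem.mp ha with ⟨j, hj, rfl⟩
        simpa using hlt j hj hj)).symm

lemma cut_mem (T : List Int) (p : Int) (hs : T.Pairwise (· < ·)) :
    (cLT T p < T.length ∧ T.getD (cLT T p) 0 = p) ↔ p ∈ T := by
  constructor
  · rintro ⟨h1, h2⟩
    rw [List.getD_eq_getElem _ _ h1] at h2
    exact h2 ▸ List.getElem_mem h1
  · intro hp
    rcases List.mem_iff_getElem.mp hp with ⟨j, hj, hje⟩
    have hc : cLT T p = j := by
      refine countP_cut p T hs j (by omega)
        (fun i hi hij => ?_) (fun hk => ?_)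
      · have : T[i] < T[j] := List.pairwise_iff_getElem.mp hs i j hi hj hij
        omega
      · omega
    refine ⟨by omega, ?_⟩
    rw [hc, List.getD_eq_getElem _ _ hj, hje]

lemma bGroup_fold (T : List Int) (hs : T.Pairwise (· < ·)) :
    ∀ (P : List Int), P.Pairwise (· < ·) → ∀ (k : Nat) (acc : Int), k ≤ T.length →
    (∀ p ∈ P, ∀ j (hj : j < T.length), j < k → T[j] < p) →
    (P.foldl (bGroup T) (k, acc)).2 = acc + (P.map (fun p =>
      (cLT T p : Int) * ((T.length : Int) - (cLT T p : Int)
        - (if p ∈ T then 1 else 0)))).sum := by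
  intro P
  induction P with
  | nil => intro _ k acc _ _; simp
  | cons p P' ih =>
    intro hP k acc hk hlt
    have hadv : bAdvance T p k = cLT T p :=
      bAdvance_eq T p hs (T.length - k) k le_rfl hk (hlt p (by simp))
    have heq : (if cLT T p < T.length ∧ T.getD (cLT T p) 0 = p then (1:Int) else 0)
        = (if p ∈ T then (1:Int) else 0) := by
      by_cases h : p ∈ T
      · rw [if_pos ((cut_mem T p hs).mpr h), if_pos h]
      · rw [if_neg (fun hc => h ((cut_mem T p hs).mp hc)), if_neg h]
    rw [List.foldl_cons]
    have hstep : bGroup T (k, acc) p = (cLT T p,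
        acc + (cLT T p : Int) * ((T.length : Int) - (cLT T p : Int)
          - (if p ∈ T then 1 else 0))) := by
      rw [bGroup]
      simp only [hadv]
      rw [heq]
    rw [hstep, ih hP.of_cons (cLT T p) _ (List.countP_le_length)
      (fun p' hp' j hj hjc => ?_), List.map_cons, List.sum_cons]
    · ring
    · have h1 : T[j] < p := getElem_lt_of_lt_cLT T p hs j hj hjc
      have h2 : p < p' := List.rel_of_pairwise_cons hP hp'
      omega


lemma countTake (nums : List Int) (t : Int) :
    ∀ i, i ≤ nums.length →
      (nums.take i).count t = (List.range i).countP (fun j => nums.getD j 0 = t) := by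
  intro i
  induction i with
  | zero => simp
  | succ i ih =>
    intro h
    have hlt : i < nums.length := by omega
    have htake : nums.take (i+1) = nums.take i ++ [nums[i]] := by
      rw [List.take_succ]
      simp [List.getElem?_eq_getElem hlt]
    rw [htake, List.count_append, List.range_succ, List.countP_append, ih (by omega)]
    congr 1
    rw [List.count_singleton, List.countP_cons, List.countP_nil,
      List.getD_eq_getElem _ _ hlt]
    by_cases h' : nums[i] = t <;> simp [h']

lemma countP_lt_range (n i : Nat) (hin : i ≤ n) (q : Nat → Bool) :
    ((List.range n).filter q).countP (fun j => j < i) = (List.range i).countP q := by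
  rw [List.countP_filter]
  have hn : n = i + (n - i) := by omega
  rw [hn, List.range_add, List.countP_append]
  have h1 : (List.range i).countP (fun a => decide (a < i) && q a) = (List.range i).countP q :=
    List.countP_congr (fun a ha => by simp [List.mem_range.mp ha])
  have h2 : ((List.range (n-i)).map (fun x => i + x)).countP (fun a => decide (a < i) && q a)
      = 0 := by
    rw [List.countP_map, List.countP_eq_zero]
    intro a _
    simp
  rw [h1, h2]
  omega

lemma count_split (nums : List Int) (t : Int) (i : Nat) (hi : i < nums.length) :
    nums.count t = (nums.take i).count t + (if nums.getD i 0 = t then 1 else 0)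
      + (nums.drop (i+1)).count t := by
  conv_lhs => rw [← List.take_append_drop i nums]
  rw [List.count_append, List.drop_eq_getElem_cons hi, List.count_cons,
    List.getD_eq_getElem _ _ hi]
  by_cases h : nums[i] = t <;> simp [h] <;> omega

lemma term_eq (nums : List Int) (i : Nat) (hi : i < nums.length) (v : Int)
    (hv : nums.getD i 0 = v) :
    (cLT (idxI nums (2*v)) (i : Int) : Int) * (((idxI nums (2*v)).length : Int)
        - (cLT (idxI nums (2*v)) (i : Int) : Int)
        - (if (i : Int) ∈ idxI nums (2*v) then 1 else 0)) = pvF nums i := by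
  have hq : ∀ m, m ≤ nums.length →
      (List.range m).countP (fun j => nums.getD j 0 = 2*v) = (nums.take m).count (2*v) :=
    fun m hm => (countTake nums (2*v) m hm).symm
  have hcLT : cLT (idxI nums (2*v)) (i : Int) = (nums.take i).count (2*v) := by
    rw [cLT, idxI, List.countP_map]
    have hc : ((idxN nums (2*v)).countP ((fun x => decide (x < (i:Int))) ∘ (fun j : Nat => (j : Int))))
        = (idxN nums (2*v)).countP (fun j => j < i) :=
      List.countP_congr (fun a _ => by simp)
    rw [hc, idxN, countP_lt_range nums.length i (by omega), hq i (by omega)]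
  have hlen : (idxI nums (2*v)).length = nums.count (2*v) := by
    rw [idxI, List.length_map, idxN, ← List.countP_eq_length_filter,
      hq nums.length le_rfl, List.take_length]
  have hmem : ((i : Int) ∈ idxI nums (2*v)) ↔ nums.getD i 0 = 2*v := by
    rw [idxI, List.mem_map]
    constructor
    · rintro ⟨j, hj, hje⟩
      have hji : j = i := by exact_mod_cast hje
      subst hji
      simpa using (List.mem_filter.mp hj).2
    · intro h
      exact ⟨i, List.mem_filter.mpr ⟨List.mem_range.mpr hi, by simpa using h⟩, rfl⟩
  have hsplit := count_split nums (2*v) i hi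
  have ht : nums.getD i 0 * 2 = 2*v := by rw [hv]; ring
  rw [hcLT, hlen, pvF, ht]
  by_cases h : nums.getD i 0 = 2*v
  · rw [if_pos (hmem.mpr h)] at *
    rw [if_pos h] at hsplit
    rw [hsplit]
    push_cast
    ring
  · rw [if_neg (fun c => h (hmem.mp c))]
    rw [if_neg h] at hsplit
    rw [hsplit]
    push_cast
    ring

lemma sum_single_hit (a x : Int) (h : Int → Int) :
    ∀ (vs : List Int), vs.Nodup → a ∈ vs →
      (vs.map (fun v => if v = a then x + h v else h v)).sum = x + (vs.map h).sum := by
  intro vs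
  induction vs with
  | nil => intro _ hmem; simp at hmem
  | cons w vs' ih =>
    intro hnd hmem
    by_cases hw : w = a
    · subst hw
      have hnotin : w ∉ vs' := (List.nodup_cons.mp hnd).1
      have hmap : vs'.map (fun v => if v = w then x + h v else h v) = vs'.map h :=
        List.map_congr_left (fun v hv => if_neg (fun e => hnotin (by rw [← e]; exact hv)))
      rw [List.map_cons, List.sum_cons, if_pos rfl, hmap, List.map_cons, List.sum_cons]
      ring
    · have hmem' : a ∈ vs' := by
        rcases List.mem_cons.mp hmem with h' | h'
        · exact absurd h'.symm hw
        · exact h'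
      rw [List.map_cons, List.sum_cons, if_neg hw,
        ih (List.nodup_cons.mp hnd).2 hmem', List.map_cons, List.sum_cons]
      ring

lemma regroup (F : Nat → Int) (key : Nat → Int) :
    ∀ (l : List Nat) (vs : List Int), vs.Nodup → (∀ i ∈ l, key i ∈ vs) →
    (vs.map (fun v => ((l.filter (fun i => key i = v)).map F).sum)).sum = (l.map F).sum := by
  intro l
  induction l with
  | nil => intro vs _ _; simp
  | cons i l' ih =>
    intro vs hnd hcov
    have hstep : ∀ v, (((i :: l').filter (fun j => key j = v)).map F).sum
        = (if v = key i then F i + ((l'.filter (fun j => key j = v)).map F).sum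
           else ((l'.filter (fun j => key j = v)).map F).sum) := by
      intro v
      rw [List.filter_cons]
      by_cases h : v = key i
      · rw [if_pos (by simp [h]), if_pos h, List.map_cons, List.sum_cons]
      · have h' : ¬ key i = v := fun e => h e.symm
        rw [if_neg (by simpa using h'), if_neg h]
    calc (vs.map (fun v => (((i :: l').filter (fun j => key j = v)).map F).sum)).sum
        = (vs.map (fun v => if v = key i then F i + ((l'.filter (fun j => key j = v)).map F).sum
            else ((l'.filter (fun j => key j = v)).map F).sum)).sum := by
          exact congrArg _ (List.map_congr_left (fun v _ => hstep v))
      _ = F i + (vs.map (fun v => ((l'.filter (fun j => key j = v)).map F).sum)).sum :=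
          sum_single_hit (key i) (F i) _ vs hnd (hcov i (by simp))
      _ = F i + (l'.map F).sum := by rw [ih vs hnd (fun j hj => hcov j (by simp [hj]))]
      _ = ((i :: l').map F).sum := by rw [List.map_cons, List.sum_cons]

lemma B_eq (nums : List Int) : specialTriplets2_alt nums = pvS nums % (10 ^ 9 + 7) := by
  obtain ⟨hg, hnd, hm⟩ := bBuild_spec nums
  have hshow : specialTriplets2_alt nums = PySem.Int.mod
      ((bBuild nums).items.foldl (fun res mP =>
        ((mP.2.foldl (bGroup ((bBuild nums).getD (2 * mP.1) [])) (0, res)).2)) 0)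
      (10 ^ 9 + 7) := rfl
  have hbody : ∀ (res : Int), ∀ v ∈ (bBuild nums).keys,
      ((((bBuild nums).getD v []).foldl (bGroup ((bBuild nums).getD (2*v) [])) (0, res)).2)
        = res + ((idxN nums v).map (pvF nums)).sum := by
    intro res v _
    rw [hg v, hg (2*v)]
    rw [bGroup_fold (idxI nums (2*v)) (idxI_sorted nums (2*v)) (idxI nums v)
      (idxI_sorted nums v) 0 res (by omega) (by intro p _ j _ hj0; omega)]
    congr 1
    simp only [idxI, List.map_map]
    refine congrArg List.sum (List.map_congr_left ?_)
    intro i hi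
    have hir := List.mem_filter.mp hi
    have hiv : nums.getD i 0 = v := by simpa using hir.2
    have hin : i < nums.length := List.mem_range.mp hir.1
    simpa [idxI] using term_eq nums i hin v hiv
  rw [hshow, PySem.Dict.items_eq_map_keys _ hnd [], List.foldl_map,
    PySem.List.foldl_congr_mem _ _
      (fun res v => res + ((idxN nums v).map (pvF nums)).sum) 0
      (fun acc x hx => hbody acc x hx),
    PySem.List.foldl_add, zero_add]
  have hcov : ∀ i ∈ List.range nums.length, nums.getD i 0 ∈ (bBuild nums).keys := by
    intro i hi
    have hin : i < nums.length := List.mem_range.mp hi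
    rw [List.getD_eq_getElem _ _ hin]
    exact (hm _).mpr (List.getElem_mem hin)
  have hre := regroup (pvF nums) (fun i => nums.getD i 0) (List.range nums.length)
    (bBuild nums).keys hnd hcov
  have hfin : ((bBuild nums).keys.map (fun v => ((idxN nums v).map (pvF nums)).sum)).sum
      = pvS nums := by
    calc ((bBuild nums).keys.map (fun v => ((idxN nums v).map (pvF nums)).sum)).sum
        = ((bBuild nums).keys.map (fun v => (((List.range nums.length).filter
            (fun i => nums.getD i 0 = v)).map (pvF nums)).sum)).sum := rfl
      _ = ((List.range nums.length).map (pvF nums)).sum := hre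
      _ = pvS nums := rfl
  rw [PySem.Int.mod_eq_emod_of_pos (by norm_num), hfin]

-- ===== VERDICT (by name: the statement is the Claim_ definition above) =====
theorem specialTriplets2_spec : Claim_equal_specialTriplets2 := by
  intro nums _
  unfold Spec_specialTriplets2
  rw [A_eq, B_eq]
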